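-- pv_equiv track=rewrite | github.com/EoinDavey/Muse | Calliope/parser.py | procDmp
-- ===== SOURCE A (Python) =====
-- def procDmp(dmp):
--     l = len(dmp)
--     w = max(map(len,dmp.values()))
--     lss = [[("wait",)]*l for _ in range(w)]
--     for time in range(l):
--         for i in range(len(dmp[time])):
--             lss[i][time] = dmp[time][i]
--     return lss
-- ===== SOURCE B (Python) =====
-- def procDmp(dmp):
--     # Streaming transpose: grow the output rows one time-step at a time,
--     # creating new output rows (back-padded with ('wait',)) the first time a
--     # long enough input row appears.  No precomputed width, no prefilled grid.
--     out = []
--     for t in range(len(dmp)):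
--         r = dmp[t]
--         out += [[("wait",)] * t for _ in range(len(r) - len(out))]
--         out = [row + [r[i] if i < len(r) else ("wait",)]
--                for i, row in enumerate(out)]
--     return out
-- ===== Notes on version B (the rewrite author's own statement) =====
-- stated objective: alternative
-- what changed: Replaces A's width-precomputation plus prefilled sentinel grid with nested index-assignment by a single streaming pass that grows the output rows incrementally, back-padding a new output row with ('wait',) entries the first time an input row is long enough to need it.
import Mathlib
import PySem

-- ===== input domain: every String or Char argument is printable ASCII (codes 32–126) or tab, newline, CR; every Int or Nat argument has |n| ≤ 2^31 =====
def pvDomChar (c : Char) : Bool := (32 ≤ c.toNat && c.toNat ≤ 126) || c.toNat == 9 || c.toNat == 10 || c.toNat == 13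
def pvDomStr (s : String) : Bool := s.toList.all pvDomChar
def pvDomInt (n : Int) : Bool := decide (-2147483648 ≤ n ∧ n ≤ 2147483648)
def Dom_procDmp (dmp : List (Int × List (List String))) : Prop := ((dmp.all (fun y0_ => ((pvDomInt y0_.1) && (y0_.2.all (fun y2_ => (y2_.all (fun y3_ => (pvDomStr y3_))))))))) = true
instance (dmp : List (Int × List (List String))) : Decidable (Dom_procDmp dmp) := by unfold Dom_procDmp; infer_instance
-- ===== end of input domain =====

-- B replaces A's width-precomputation + prefilled sentinel grid + nested index assignments
-- with a single streaming pass that grows the output rows incrementally (alternative, same cost).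


-- ===== PORT A =====
def procDmp (dmp : List (Int × List (List String))) : List (List (List String)) :=
  let d : PySem.Dict Int (List (List String)) := PySem.Dict.mk dmp
  let l : Int := (PySem.Dict.size d : Int)
  match PySem.List.max? ((PySem.Dict.values d).map (fun v => (v.length : Int))) (fun x => x) with
  | none => []  -- max() of an empty dict raises ValueError; excluded by Pre_
  | some w =>
    let lss0 : List (List (List String)) :=
      (PySem.List.pyRange 0 w 1).map (fun _ => (PySem.List.pyRange 0 l 1).map (fun _ => (["wait"] : List String)))
    (PySem.List.pyRange 0 l 1).foldl (fun lss time =>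
      let row := (PySem.Dict.get? d time).getD []   -- KeyError excluded by Pre_
      (PySem.List.pyRange 0 (row.length : Int) 1).foldl (fun lss i =>
        PySem.List.pySetD lss i
          (PySem.List.pySetD (PySem.List.pyGetD lss i []) time (PySem.List.pyGetD row i []))) lss) lss0

-- ===== PORT B =====
def procDmp_alt (dmp : List (Int × List (List String))) : List (List (List String)) :=
  let d : PySem.Dict Int (List (List String)) := PySem.Dict.mk dmp
  (PySem.List.pyRange 0 ((PySem.Dict.size d : Int)) 1).foldl (fun out t =>
    let r := (PySem.Dict.get? d t).getD []          -- KeyError excluded by Pre_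
    let out := out ++ (List.range (r.length - out.length)).map
      (fun _ => List.replicate t.toNat (["wait"] : List String))   -- [("wait",)] * t  (t ≥ 0 here)
    (PySem.List.enumerate out 0).map (fun p =>
      p.2 ++ [if p.1 < (r.length : Int) then PySem.List.pyGetD r p.1 [] else ["wait"]])) []

-- ===== PRECONDITION & SPEC =====
-- Pre_ = exactly where the Python A returns: nonempty dict (else max() raises ValueError) whose
-- keys are 0..len-1 (else dmp[time] raises KeyError); Nodup keys because the list encodes a dict.
def Pre_procDmp (dmp : List (Int × List (List String))) : Prop :=
  dmp ≠ [] ∧ (dmp.map Prod.fst).Nodup ∧ ∀ n ∈ List.range dmp.length, (n : Int) ∈ dmp.map Prod.fst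
instance (dmp : List (Int × List (List String))) : Decidable (Pre_procDmp dmp) := by unfold Pre_procDmp; infer_instance

def pvWitness_procDmp : (List (Int × List (List String))) := [(1, []), (0, [["a"], ["b", "c"]])]

def Spec_procDmp (dmp : List (Int × List (List String))) (out : List (List (List String))) : Prop := out = procDmp_alt dmp
instance (dmp : List (Int × List (List String))) (out : List (List (List String))) : Decidable (Spec_procDmp dmp out) := by unfold Spec_procDmp; infer_instance

-- ===== CLAIM (what is proved, stated in full; the proofs are below) =====
def Claim_equal_procDmp : Prop := ∀ (dmp : List (Int × List (List String))), Dom_procDmp dmp → Pre_procDmp dmp → Spec_procDmp dmp (procDmp dmp)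

-- ===== LEMMAS AND PROOFS =====

-- ---- generic list facts ----
theorem pv_foldl_len {α β : Type} (F : List α → β → List α)
    (hF : ∀ G b, (F G b).length = G.length) :
    ∀ (xs : List β) (G : List α), (xs.foldl F G).length = G.length := by
  intro xs
  induction xs with
  | nil => intro G; rfl
  | cons x xs ih => intro G; rw [List.foldl_cons, ih, hF]

-- ---- A-side: the nested index-assignment loops fill the canonical grid ----
theorem pv_inner_getElem? {α : Type} (t : Nat) (v : Nat → α) (dflt : List α) :
    ∀ (n : Nat) (G : List (List α)) (j : Nat),
    ((List.range n).foldl (fun G i => G.set i ((G.getD i dflt).set t (v i))) G)[j]? =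
      if j < n then (G[j]?).map (fun r => r.set t (v j)) else G[j]? := by
  intro n
  induction n with
  | zero => intro G j; simp
  | succ n ih =>
    intro G j
    rw [List.range_succ, List.foldl_append]
    simp only [List.foldl_cons, List.foldl_nil]
    rw [List.getElem?_set]
    have hlen := pv_foldl_len (fun G i => G.set i ((G.getD i dflt).set t (v i)))
      (fun G i => List.length_set ..) (List.range n) G
    by_cases hj : n = j
    · subst hj
      have hgd : ((List.range n).foldl (fun G i => G.set i ((G.getD i dflt).set t (v i))) G).getD n dflt
          = (G[n]?).getD dflt := by
        rw [List.getD_eq_getElem?_getD, ih]; simp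
      rw [hlen, hgd, if_pos (by omega : n < n + 1)]
      cases h : G[n]? with
      | none =>
        have hGn := List.getElem?_eq_none_iff.mp h
        rw [if_neg (show ¬ n < G.length by omega)]
        simp
      | some r =>
        have hn : n < G.length := (List.getElem?_eq_some_iff.mp h).1
        rw [if_pos hn]; simp
    · rw [if_neg hj, ih]
      by_cases h2 : j < n
      · rw [if_pos h2, if_pos (by omega)]
      · rw [if_neg h2, if_neg (by omega)]

theorem pv_outer_getElem? {α : Type} (rowf : Nat → List α) (dflt : List α) (d2 : α) :
    ∀ (ts : List Nat) (G : List (List α)) (j : Nat),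
    (ts.foldl (fun G t =>
        (List.range (rowf t).length).foldl
          (fun G i => G.set i ((G.getD i dflt).set t ((rowf t).getD i d2))) G) G)[j]? =
      (G[j]?).map (fun r => ts.foldl
        (fun r t => if j < (rowf t).length then r.set t ((rowf t).getD j d2) else r) r) := by
  intro ts
  induction ts with
  | nil => intro G j; simp
  | cons t ts ih =>
    intro G j
    simp only [List.foldl_cons]
    rw [ih, pv_inner_getElem?]
    by_cases hj : j < (rowf t).length
    · rw [if_pos hj]
      cases G[j]? <;> simp [hj]
    · rw [if_neg hj]
      cases G[j]? <;> simp [hj]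

theorem pv_col_getElem? {α : Type} (cond : Nat → Prop) [DecidablePred cond] (val : Nat → α) :
    ∀ (l : Nat) (r0 : List α) (t : Nat),
    ((List.range l).foldl (fun r t => if cond t then r.set t (val t) else r) r0)[t]? =
      if t < l ∧ cond t then (r0[t]?).map (fun _ => val t) else r0[t]? := by
  intro l
  induction l with
  | zero => intro r0 t; simp
  | succ n ih =>
    intro r0 t
    rw [List.range_succ, List.foldl_append]
    simp only [List.foldl_cons, List.foldl_nil]
    have hlen := pv_foldl_len (fun r t => if cond t then r.set t (val t) else r)
      (fun r t => by show (if cond t then r.set t (val t) else r).length = r.length; split <;> simp)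
      (List.range n) r0
    by_cases hc : cond n
    · rw [if_pos hc, List.getElem?_set, hlen]
      by_cases ht : n = t
      · subst ht
        rw [if_pos rfl]
        cases h : r0[n]? with
        | none =>
          have := List.getElem?_eq_none_iff.mp h
          rw [if_neg (show ¬ n < r0.length by omega)]; simp
        | some r =>
          rw [if_pos (List.getElem?_eq_some_iff.mp h).1]; simp [hc]
      · rw [if_neg ht, ih]
        by_cases h2 : t < n ∧ cond t
        · rw [if_pos h2, if_pos ⟨by omega, h2.2⟩]
        · rw [if_neg h2, if_neg (by
            rintro ⟨h3, h4⟩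
            rcases Nat.lt_succ_iff_lt_or_eq.mp h3 with h | h
            · exact h2 ⟨h, h4⟩
            · exact ht h.symm)]
    · rw [if_neg hc, ih]
      by_cases h2 : t < n ∧ cond t
      · rw [if_pos h2, if_pos ⟨by omega, h2.2⟩]
      · rw [if_neg h2, if_neg (by
          rintro ⟨h3, h4⟩
          rcases Nat.lt_succ_iff_lt_or_eq.mp h3 with h | h
          · exact h2 ⟨h, h4⟩
          · subst h; exact hc h4)]

theorem pv_grid {α : Type} (rowf : Nat → List α) (fill : α) (d2 : α) (l w : Nat) :
    (List.range l).foldl (fun G t =>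
        (List.range (rowf t).length).foldl
          (fun G i => G.set i ((G.getD i ([] : List α)).set t ((rowf t).getD i d2))) G)
      ((List.range w).map (fun _ => (List.range l).map (fun _ => fill)))
    = (List.range w).map (fun j => (List.range l).map
        (fun t => if j < (rowf t).length then (rowf t).getD j d2 else fill)) := by
  apply List.ext_getElem?
  intro j
  rw [pv_outer_getElem? rowf ([] : List α) d2]
  rw [List.getElem?_map, List.getElem?_map]
  by_cases hj : j < w
  · rw [List.getElem?_range hj]
    simp only [Option.map_some]
    congr 1
    apply List.ext_getElem?
    intro t
    rw [pv_col_getElem? (fun t => j < (rowf t).length) (fun t => (rowf t).getD j d2)]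
    rw [List.getElem?_map, List.getElem?_map]
    by_cases ht : t < l
    · rw [List.getElem?_range ht]
      by_cases hP : j < (rowf t).length
      · rw [if_pos ⟨ht, hP⟩]; simp [hP]
      · rw [if_neg (by tauto)]; simp [hP]
    · rw [List.getElem?_eq_none_iff.mpr (by simpa using ht)]
      simp
  · rw [List.getElem?_eq_none_iff.mpr (by simpa using hj)]
    simp

theorem pv_max?_perm {xs ys : List Int} (h : xs.Perm ys) :
    PySem.List.max? xs (fun x => x) = PySem.List.max? ys (fun x => x) := by
  cases hx : PySem.List.max? xs (fun x => x) with
  | none =>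
    rw [PySem.List.max?_eq_none_iff] at hx
    subst hx
    rw [(PySem.List.max?_eq_none_iff ys _).mpr h.nil_eq.symm]
  | some m =>
    cases hy : PySem.List.max? ys (fun x => x) with
    | none =>
      rw [PySem.List.max?_eq_none_iff] at hy
      subst hy
      rw [(PySem.List.max?_eq_none_iff xs _).mpr h.symm.nil_eq.symm] at hx
      exact absurd hx (by simp)
    | some m' =>
      have h1 : m ≤ m' := PySem.List.max?_isMax hy m (h.mem_iff.mp (PySem.List.max?_mem hx))
      have h2 : m' ≤ m := PySem.List.max?_isMax hx m' (h.mem_iff.mpr (PySem.List.max?_mem hy))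
      rw [le_antisymm h1 h2]

-- ---- width: max? of the cast lengths is the running Nat max ----
theorem pv_foldl_max_cast :
    ∀ (xs : List Nat) (m : Nat), (xs.map (fun (n : Nat) => (n : Int))).foldl max (m : Int)
      = ((xs.foldl max m : Nat) : Int) := by
  intro xs
  induction xs with
  | nil => intro m; rfl
  | cons x xs ih =>
    intro m
    rw [List.map_cons, List.foldl_cons, List.foldl_cons, ← Nat.cast_max, ih]

theorem pv_max?_cast {xs : List Nat} {w : Int}
    (h : PySem.List.max? (xs.map (fun (n : Nat) => (n : Int))) (fun x => x) = some w) :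
    w.toNat = xs.foldl max 0 := by
  cases xs with
  | nil => simp [PySem.List.max?] at h
  | cons x t =>
    rw [List.map_cons, PySem.List.max?_id_cons, pv_foldl_max_cast, Option.some.injEq] at h
    rw [← h, Int.toNat_natCast, List.foldl_cons, Nat.zero_max]

-- ---- B-side: the streaming fold builds the canonical grid ----
theorem pv_enum_map {α β : Type} (m : Nat) (f : Nat → α) (G : Int × α → β) :
    (PySem.List.enumerate ((List.range m).map f) 0).map G
      = (List.range m).map (fun (j : Nat) => G ((j : Int), f j)) := by
  apply List.ext_getElem?
  intro j
  rw [List.getElem?_map, PySem.List.getElem?_enumerate, List.getElem?_map, List.getElem?_map]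
  by_cases hj : j < m
  · rw [List.getElem?_range hj]; simp
  · rw [List.getElem?_eq_none_iff.mpr (by simpa using hj)]; simp

theorem pv_pad {α : Type} (a b : Nat) (c : Nat → α) (k : α) :
    (List.range a).map c ++ (List.range (b - a)).map (fun _ => k)
      = (List.range (max a b)).map (fun j => if j < a then c j else k) := by
  apply List.ext_getElem?
  intro j
  rw [List.getElem?_append]
  simp only [List.length_map, List.length_range, List.getElem?_map]
  by_cases hj : j < a
  · rw [if_pos hj, List.getElem?_range hj, List.getElem?_range (by omega : j < max a b)]
    simp [hj]
  · rw [if_neg hj]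
    by_cases hb : j < max a b
    · rw [List.getElem?_range (by omega : j - a < b - a), List.getElem?_range hb]
      simp [hj]
    · rw [List.getElem?_eq_none_iff.mpr (by simp; omega),
        List.getElem?_eq_none_iff.mpr (by simp; omega)]
      simp

theorem pv_le_foldl_max (t : Nat) :
    ∀ (xs : List Nat) (m : Nat), m ≤ xs.foldl max m ∧ (t ∈ xs → t ≤ xs.foldl max m) := by
  intro xs
  induction xs with
  | nil => intro m; simp
  | cons x xs ih =>
    intro m
    constructor
    · exact le_trans (le_max_left m x) (ih (max m x)).1
    · intro ht
      rcases List.mem_cons.mp ht with h | h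
      · subst h; exact le_trans (le_max_right m t) (ih (max m t)).1
      · exact (ih (max m x)).2 h

theorem pv_grid_alt {α : Type} (rowf : Nat → List α) (fill : α) (d2 : α) :
    ∀ (n : Nat),
    (List.range n).foldl (fun out t =>
        (PySem.List.enumerate (out ++ (List.range ((rowf t).length - out.length)).map
            (fun _ => List.replicate t fill)) 0).map (fun p =>
          p.2 ++ [if p.1 < ((rowf t).length : Int)
                  then PySem.List.pyGetD (rowf t) p.1 d2 else fill])) []
      = (List.range (((List.range n).map (fun t => (rowf t).length)).foldl max 0)).map
          (fun j => (List.range n).map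
            (fun t => if j < (rowf t).length then (rowf t).getD j d2 else fill)) := by
  intro n
  induction n with
  | zero => simp
  | succ n ih =>
    rw [List.range_succ, List.foldl_append, List.foldl_cons, List.foldl_nil, ih]
    set W : Nat := ((List.range n).map (fun t => (rowf t).length)).foldl max 0 with hW
    have hWlen : ∀ t < n, (rowf t).length ≤ W := by
      intro t ht
      exact (pv_le_foldl_max ((rowf t).length) _ 0).2
        (List.mem_map.mpr ⟨t, List.mem_range.mpr ht, rfl⟩)
    have hW' : ((List.range n).map (fun t => (rowf t).length) ++ [(rowf n).length]).foldl max 0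
        = max W (rowf n).length := by
      rw [List.foldl_append, List.foldl_cons, List.foldl_nil]
    rw [List.map_append, List.map_cons, List.map_nil, hW', List.length_map, List.length_range]
    -- replicate = the canonical column for j ≥ W
    have hrep : ∀ j, W ≤ j →
        (List.range n).map (fun t => if j < (rowf t).length then (rowf t).getD j d2 else fill)
          = List.replicate n fill := by
      intro j hj
      rw [List.eq_replicate_iff]
      refine ⟨by simp, ?_⟩
      intro b hb
      rcases List.mem_map.mp hb with ⟨t, ht, hbt⟩
      rw [if_neg (by have := hWlen t (List.mem_range.mp ht); omega)] at hbt
      exact hbt.symm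
    rw [pv_pad]
    rw [show ((List.range (max W (rowf n).length)).map
        (fun j => if j < W then (List.range n).map
          (fun t => if j < (rowf t).length then (rowf t).getD j d2 else fill)
        else List.replicate n fill))
      = (List.range (max W (rowf n).length)).map
        (fun j => (List.range n).map
          (fun t => if j < (rowf t).length then (rowf t).getD j d2 else fill)) from
      List.map_congr_left (by
        intro j hj
        by_cases h : j < W
        · rw [if_pos h]
        · rw [if_neg h, hrep j (by omega)])]
    rw [pv_enum_map]
    apply List.map_congr_left
    intro j hj
    dsimp only
    rw [List.map_append, List.map_cons, List.map_nil]
    congr 1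
    by_cases h : j < (rowf n).length
    · rw [if_pos (by exact_mod_cast h), if_pos h, PySem.List.pyGetD_natCast,
        List.getD_eq_getElem?_getD]
    · rw [if_neg (by exact_mod_cast h), if_neg h]

-- ---- main equivalence ----
theorem procDmp_eq (dmp : List (Int × List (List String)))
    (_hne : dmp ≠ []) (hnd : (dmp.map Prod.fst).Nodup)
    (hcov : ∀ n ∈ List.range dmp.length, (n : Int) ∈ dmp.map Prod.fst) :
    procDmp dmp = procDmp_alt dmp := by
  unfold procDmp procDmp_alt
  dsimp only
  have hkeys : (PySem.Dict.mk dmp).keys = dmp.map Prod.fst := by simp [PySem.Dict.keys]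
  have hkperm : (PySem.List.pyRange 0 ((PySem.Dict.size (PySem.Dict.mk dmp) : Int)) 1).Perm
      ((PySem.Dict.mk dmp).keys) := by
    apply List.Subperm.perm_of_length_le
    · apply List.subperm_of_subset (PySem.List.nodup_pyRange_one ..)
      intro x hx
      rw [PySem.List.mem_pyRange_one] at hx
      obtain ⟨h0, h1⟩ := hx
      lift x to Nat using h0
      rw [hkeys]
      exact hcov x (List.mem_range.mpr (by exact_mod_cast h1))
    · rw [hkeys]
      simp [PySem.List.length_pyRange_one, PySem.Dict.size]
  have hvals : (PySem.Dict.mk dmp).values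
      = ((PySem.Dict.mk dmp).keys).map (fun k => ((PySem.Dict.mk dmp).get? k).getD []) := by
    rw [PySem.Dict.values_eq_map_keys _ (by rw [hkeys]; exact hnd) []]
    simp only [PySem.Dict.getD_eq_get?_getD]
  have hmax : PySem.List.max? (((PySem.Dict.mk dmp).values).map (fun v => (v.length : Int))) (fun x => x)
      = PySem.List.max? ((((PySem.List.pyRange 0 ((PySem.Dict.size (PySem.Dict.mk dmp) : Int)) 1).map
          (fun t => ((PySem.Dict.mk dmp).get? t).getD [])).map (fun r => (r.length : Int)))) (fun x => x) := by
    apply pv_max?_perm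
    rw [hvals]
    exact ((hkperm.symm.map (fun k => ((PySem.Dict.mk dmp).get? k).getD [])).map (fun r => (r.length : Int)))
  rw [hmax]
  cases hB : PySem.List.max? ((((PySem.List.pyRange 0 ((PySem.Dict.size (PySem.Dict.mk dmp) : Int)) 1).map
      (fun t => ((PySem.Dict.mk dmp).get? t).getD [])).map (fun r => (r.length : Int)))) (fun x => x) with
  | none =>
    -- impossible under Pre_, but both sides are [] anyway
    rw [PySem.List.max?_eq_none_iff] at hB
    simp only [List.map_eq_nil_iff] at hB
    rw [hB, List.foldl_nil]
  | some w =>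
    have hw0 : 0 ≤ w := by
      rcases List.mem_map.mp (PySem.List.max?_mem hB) with ⟨r, -, rfl⟩
      exact Int.natCast_nonneg _
    lift w to Nat using hw0
    -- reduce the int-indexed loops/ranges to Nat-indexed ones
    simp only [PySem.List.pyRange_zero, List.foldl_map, List.map_map, Function.comp_def,
      Int.toNat_natCast, PySem.List.pySetD_natCast, PySem.List.pyGetD_natCast]
    -- A side: the nested assignment loops fill the canonical grid
    rw [pv_grid (fun t => ((PySem.Dict.mk dmp).get? (t : Int)).getD []) ["wait"] []
      (PySem.Dict.size (PySem.Dict.mk dmp)) w]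
    -- B side: the streaming fold builds the same canonical grid
    rw [pv_grid_alt (fun t => ((PySem.Dict.mk dmp).get? (t : Int)).getD []) ["wait"] []
      (PySem.Dict.size (PySem.Dict.mk dmp))]
    -- widths agree
    simp only [PySem.List.pyRange_zero, List.map_map, Function.comp_def] at hB
    have hwW := pv_max?_cast (xs := (List.range ((PySem.Dict.size (PySem.Dict.mk dmp) : Int)).toNat).map
      (fun (t : Nat) => (((PySem.Dict.mk dmp).get? (t : Int)).getD ([] : List (List String))).length))
      (w := ((w : Nat) : Int)) (by rw [List.map_map]; exact hB)
    simp only [Int.toNat_natCast] at hwW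
    rw [← hwW]

-- ===== VERDICT (by name: the statement is the Claim_ definition above) =====
theorem procDmp_spec : Claim_equal_procDmp := by
  intro dmp _ hPre
  obtain ⟨hne, hnd, hcov⟩ := hPre
  exact procDmp_eq dmp hne hnd hcov
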